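-- pv_equiv track=rewrite | github.com/lyh6849/repo1782 | app1782/views.py | id_to_string
-- ===== SOURCE A (Python) =====
-- def remove_last_n(aa,n):
--     result=""
--     count = 0
--     while (count < len(aa)-n):
--         result=result+aa[count]
--         count = count + 1
--     return result
--
-- def array_to_string(array):
--   string_391=""
--   for i in array:
--     if string_391=="":
--       string_391=str(i)
--     else:
--       string_391=string_391+" "+str(i)
--   return string_391
--
-- def id_to_string(x):
--   input_array=[]
--   while len(x)>=4:
--     input_array.append(x)
--     x=remove_last_n(x,4)
--   reverse_array=[]
--   j=0
--   while j<len(input_array):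
--     reverse_array.append(input_array[len(input_array)-1-j])
--     j=j+1
--   return array_to_string(reverse_array)
-- ===== SOURCE B (Python) =====
-- def id_to_string(x):
--     n = len(x)
--     return ' '.join(x[:i] for i in range(n % 4 + 4, n + 1, 4))
-- ===== Notes on version B (the rewrite author's own statement) =====
-- stated objective: simpler
-- what changed: Replaces the char-by-char trim helper, the descending collect loop and the explicit reverse loop by a single ascending strided pass: join the prefixes x[:i] for i in range(n%4+4, n+1, 4).
import Mathlib
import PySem

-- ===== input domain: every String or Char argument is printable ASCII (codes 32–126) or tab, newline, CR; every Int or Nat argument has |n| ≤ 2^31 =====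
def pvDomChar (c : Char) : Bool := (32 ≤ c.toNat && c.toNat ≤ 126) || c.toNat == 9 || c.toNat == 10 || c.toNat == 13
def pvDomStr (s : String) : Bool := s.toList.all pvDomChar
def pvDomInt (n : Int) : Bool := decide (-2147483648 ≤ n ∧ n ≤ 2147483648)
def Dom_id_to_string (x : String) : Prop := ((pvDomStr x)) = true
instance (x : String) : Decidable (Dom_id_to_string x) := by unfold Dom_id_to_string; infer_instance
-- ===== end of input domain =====

-- B replaces A's trim helper + descending collect loop + reverse loop by one ascending strided
-- pass joining the prefixes x[:i] for i in range(n%4+4, n+1, 4) (objective: simpler).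

-- ===== PORT A =====
-- remove_last_n: the counting while loop is the fold over range(0, len(aa)-n);
-- aa[count] is always in range there (count < len-n ≤ len), so the pyGetD default is unreachable.
def removeLastN (aa : List Char) (n : Int) : List Char :=
  (PySem.List.pyRange 0 ((aa.length : Int) - n) 1).foldl
    (fun result count => result ++ [PySem.List.pyGetD aa count ' ']) []

-- array_to_string: the for loop with the empty-accumulator branch.
def arrayToString (array : List (List Char)) : List Char :=
  array.foldl (fun s i => if s = [] then i else s ++ [' '] ++ i) []

-- termination fact for the main while loop (cited by decreasing_by below)
theorem removeLastN_four (aa : List Char) :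
    removeLastN aa 4 = aa.take (aa.length - 4) := by
  unfold removeLastN
  rw [PySem.List.foldl_append_singleton_eq_map, List.nil_append]
  by_cases h : 4 ≤ aa.length
  · have hc : (aa.length : Int) - 4 = ((aa.length - 4 : Nat) : Int) := by omega
    rw [hc]
    have base := PySem.List.map_pyGetD_pyRange_zero (aa.take (aa.length - 4)) ' '
    rw [PySem.List.len_eq, List.length_take] at base
    have hmin : min (aa.length - 4) aa.length = aa.length - 4 := by omega
    rw [hmin] at base
    rw [← base]
    apply List.map_congr_left
    intro j hj
    have hj' := (PySem.List.mem_pyRange_iff_of_pos (a := 0)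
      (b := ((aa.length - 4 : Nat) : Int)) (s := 1) (by omega) j).1 hj
    have h0 : 0 ≤ j := by omega
    have h1 : j < ((aa.length : Nat) : Int) := by omega
    have h2 : j < (((aa.take (aa.length - 4)).length : Nat) : Int) := by
      rw [List.length_take]; push_cast; omega
    rw [PySem.List.pyGetD_eq_getElem aa ' ' h0 h1,
        PySem.List.pyGetD_eq_getElem (aa.take (aa.length - 4)) ' ' h0 h2]
    rw [List.getElem_take]
  · have : ¬ ((0:Int) < (aa.length : Int) - 4) := by omega
    rw [PySem.List.pyRange_of_pos 0 ((aa.length : Int) - 4) (by omega)]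
    simp only [if_neg this, List.range_zero, List.map_nil]
    have : aa.length - 4 = 0 := by omega
    simp [this]

theorem removeLastN_four_lt (aa : List Char) (h : 4 ≤ aa.length) :
    (removeLastN aa 4).length < aa.length := by
  rw [removeLastN_four, List.length_take]; omega

-- the main while loop: collect x, then trim it by 4, while len(x) >= 4
def idLoop (x : List Char) (acc : List (List Char)) : List (List Char) :=
  if 4 ≤ x.length then idLoop (removeLastN x 4) (acc ++ [x]) else acc
termination_by x.length
decreasing_by exact removeLastN_four_lt x (by assumption)

def id_to_string (x : String) : String :=
  let input_array := idLoop x.toList []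
  -- the index-counting reverse loop, j = 0 .. len(input_array)-1
  let reverse_array := (PySem.List.pyRange 0 ((input_array.length : Int)) 1).foldl
    (fun acc j => acc ++ [PySem.List.pyGetD input_array ((input_array.length : Int) - 1 - j) []]) []
  String.ofList (arrayToString reverse_array)

-- ===== PORT B =====
def id_to_string_alt (x : String) : String :=
  let cs := x.toList
  let n : Int := (cs.length : Int)
  String.ofList (PySem.Chars.join [' ']
    ((PySem.List.pyRange (PySem.Int.mod n 4 + 4) (n + 1) 4).map
      (fun i => PySem.List.slice cs none (some i))))

-- ===== PRECONDITION & SPEC =====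
def Spec_id_to_string (x : String) (out : String) : Prop := out = id_to_string_alt x
instance (x : String) (out : String) : Decidable (Spec_id_to_string x out) := by unfold Spec_id_to_string; infer_instance

-- ===== CLAIM (what is proved, stated in full; the proofs are below) =====
def Claim_equal_id_to_string : Prop := ∀ (x : String), Dom_id_to_string x → Spec_id_to_string x (id_to_string x)

-- ===== LEMMAS AND PROOFS =====

-- the reverse loop is List.reverse
theorem revLoop_eq (l : List (List Char)) :
    (PySem.List.pyRange 0 ((l.length : Int)) 1).foldl
      (fun acc j => acc ++ [PySem.List.pyGetD l ((l.length : Int) - 1 - j) []]) [] = l.reverse := by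
  rw [PySem.List.foldl_append_singleton_eq_map, List.nil_append]
  have hr : PySem.List.pyRange 0 ((l.length : Int)) 1
      = PySem.List.pyRange 0 ((l.length : Int)) := rfl
  rw [hr, PySem.List.pyRange_zero_natCast, List.map_map]
  apply List.ext_getElem
  · simp
  · intro k h1 h2
    simp only [List.getElem_map, List.getElem_range, Function.comp]
    simp only [List.length_map, List.length_range] at h1
    have h0 : (0:Int) ≤ (l.length : Int) - 1 - (k : Int) := by omega
    have hlt : (l.length : Int) - 1 - (k : Int) < (l.length : Int) := by omega
    rw [PySem.List.pyGetD_eq_getElem l [] h0 hlt, List.getElem_reverse]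
    congr 1
    omega

-- idLoop's accumulator is a prefix of the result
theorem idLoop_acc (n : Nat) (x : List Char) (hx : x.length = n) (acc : List (List Char)) :
    idLoop x acc = acc ++ idLoop x [] := by
  induction n using Nat.strong_induction_on generalizing x acc with
  | _ n ih =>
    by_cases h : 4 ≤ x.length
    · conv_lhs => rw [idLoop]
      conv_rhs => rw [idLoop]
      rw [if_pos h, if_pos h]
      have hlt : (removeLastN x 4).length < n := hx ▸ removeLastN_four_lt x h
      rw [ih _ hlt _ rfl (acc ++ [x]), ih _ hlt _ rfl ([] ++ [x])]
      simp
    · conv_lhs => rw [idLoop]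
      conv_rhs => rw [idLoop]
      simp only [if_neg h, List.append_nil]

-- one step off the top of the strided range: range(a, a+4m+1, 4) = range(a, a+4m-3, 4) ++ [a+4m]
theorem pyRange_four_snoc (a : Int) (m : Nat) :
    PySem.List.pyRange a (a + 4 * m + 1) 4
      = PySem.List.pyRange a (a + 4 * m - 3) 4 ++ [a + 4 * m] := by
  rw [PySem.List.pyRange_of_pos a (a + 4 * m + 1) (by omega),
      PySem.List.pyRange_of_pos a (a + 4 * m - 3) (by omega)]
  have h1 : ((a + 4 * m + 1 - a + 4 - 1) / 4).toNat = m + 1 := by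
    have : (a + 4 * m + 1 - a + 4 - 1) = 4 * (m + 1) := by ring
    rw [this]; omega
  rw [if_pos (by omega), h1, List.range_succ, List.map_append, List.map_singleton]
  congr 1
  by_cases hm : m = 0
  · subst hm
    rw [if_neg (by omega)]
  · have h2 : ((a + 4 * m - 3 - a + 4 - 1) / 4).toNat = m := by
      have : (a + 4 * m - 3 - a + 4 - 1) = 4 * m := by ring
      rw [this]; omega
    rw [if_pos (by omega), h2]

-- the collected tokens, reversed, are exactly the ascending 4-strided prefixes
theorem idLoop_reverse_eq (n : Nat) (cs : List Char) (hcs : cs.length = n) :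
    (idLoop cs []).reverse
      = (PySem.List.pyRange ((cs.length % 4 : Nat) + 4) ((cs.length : Int) + 1) 4).map
          (fun i => PySem.List.slice cs none (some i)) := by
  induction n using Nat.strong_induction_on generalizing cs with
  | _ n ih =>
    by_cases h : 4 ≤ cs.length
    · -- one loop iteration: token cs, then recurse on cs' = cs.take (len-4)
      set cs' : List Char := cs.take (cs.length - 4) with hcs'
      have hlen' : cs'.length = cs.length - 4 := by
        rw [hcs', List.length_take]; omega
      conv_lhs => rw [idLoop]
      rw [if_pos h, removeLastN_four,
          idLoop_acc cs'.length cs' (by rw [hcs']) ([] ++ [cs])]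
      have hlt : cs'.length < n := by omega
      rw [List.reverse_append]
      simp only [List.nil_append, List.reverse_singleton]
      rw [ih _ hlt cs' rfl]
      -- split off the last range element on the RHS
      have hm4 : cs.length % 4 + 4 ≤ cs.length := by omega
      obtain ⟨m, hm⟩ : ∃ m : Nat, cs.length = cs.length % 4 + 4 + 4 * m := by
        refine ⟨(cs.length - cs.length % 4 - 4) / 4, ?_⟩
        omega
      have ha : ((cs.length : Int) + 1)
          = ((cs.length % 4 : Nat) : Int) + 4 + 4 * m + 1 := by omega
      have hsnoc := pyRange_four_snoc (((cs.length % 4 : Nat) : Int) + 4) m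
      rw [ha, hsnoc, List.map_append, List.map_singleton]
      have hlast : ((cs.length % 4 : Nat) : Int) + 4 + 4 * m = (cs.length : Int) := by omega
      rw [hlast]
      congr 1
      · -- recursive part: same range, and slices of cs' agree with slices of cs
        have hmod : cs'.length % 4 = cs.length % 4 := by omega
        have hb : (cs'.length : Int) + 1 = (cs.length : Int) - 3 := by omega
        rw [hmod, hb]
        apply List.map_congr_left
        intro i hi
        have hi' := (PySem.List.mem_pyRange_iff_of_pos (s := 4) (by omega) i).1 hi
        have h0 : (0:Int) ≤ i := by omega
        rw [PySem.List.slice_to cs' h0, PySem.List.slice_to cs h0, hcs',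
            List.take_take]
        congr 1
        omega
      · -- the token cs itself is the full-length slice
        rw [PySem.List.slice_to cs (by omega)]
        simp
    · -- fewer than 4 chars: no tokens on either side
      conv_lhs => rw [idLoop]
      rw [if_neg h, List.reverse_nil]
      have : ¬ (((cs.length % 4 : Nat) : Int) + 4 < (cs.length : Int) + 1) := by omega
      rw [PySem.List.pyRange_of_pos _ _ (by omega : (0:Int) < 4), if_neg this]
      simp

-- the empty-accumulator fold, once started on a nonempty token, is join with " "
theorem foldl_sep_eq (rest : List (List Char)) (acc : List Char) (hacc : acc ≠ []) :
    rest.foldl (fun s i => if s = [] then i else s ++ [' '] ++ i) acc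
      = acc ++ (rest.map (fun t => [' '] ++ t)).flatten := by
  induction rest generalizing acc with
  | nil => simp
  | cons q rs ih =>
    simp only [List.foldl_cons, if_neg hacc]
    rw [ih (acc ++ [' '] ++ q) (by simp)]
    simp

theorem join_space_eq (p : List Char) (rest : List (List Char)) :
    PySem.Chars.join [' '] (p :: rest)
      = p ++ (rest.map (fun t => [' '] ++ t)).flatten := by
  induction rest generalizing p with
  | nil => rw [PySem.Chars.join_singleton]; simp
  | cons q rs ih =>
    rw [PySem.Chars.join_cons_cons, ih q]
    simp

theorem arrayToString_eq_join (l : List (List Char)) (h : ∀ t ∈ l, t ≠ []) :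
    arrayToString l = PySem.Chars.join [' '] l := by
  cases l with
  | nil => simp [arrayToString, PySem.Chars.join_nil]
  | cons p rest =>
    have hp : p ≠ [] := h p (by simp)
    rw [show arrayToString (p :: rest)
          = rest.foldl (fun s i => if s = [] then i else s ++ [' '] ++ i) p from by
        simp [arrayToString]]
    rw [foldl_sep_eq rest p hp, join_space_eq p rest]

-- ===== VERDICT (by name: the statement is the Claim_ definition above) =====
theorem id_to_string_spec : Claim_equal_id_to_string := by
  unfold Claim_equal_id_to_string Spec_id_to_string
  intro x _
  unfold id_to_string id_to_string_alt
  simp only []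
  set cs := x.toList with hcs
  rw [revLoop_eq, idLoop_reverse_eq cs.length cs rfl]
  congr 1
  have hmod : PySem.Int.mod ((cs.length : Int)) 4 = ((cs.length % 4 : Nat) : Int) := by
    exact_mod_cast PySem.Int.mod_natCast cs.length 4
  rw [hmod]
  apply arrayToString_eq_join
  intro t ht
  rw [List.mem_map] at ht
  obtain ⟨i, hi, rfl⟩ := ht
  have hi' := (PySem.List.mem_pyRange_iff_of_pos (s := 4) (by omega) i).1 hi
  rw [PySem.List.slice_to cs (by omega)]
  intro hnil
  rw [List.take_eq_nil_iff] at hnil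
  rcases hnil with h1 | h2
  · omega
  · rw [h2] at hi'; simp at hi'; omega
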